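-- pv_equiv track=rewrite | github.com/rstyczynski/vendingmachine | oci-example/bin/check_dependencies.py | find_longest_path_to_target
-- ===== SOURCE A (Python) =====
-- from typing import Dict, List, Set, Tuple
--
-- def find_longest_path_to_target(tree: Dict, depends_on: Dict, target: str, current: str, path: List[str], visited: Set[str]) -> List[str]:
--     """Find the longest path from current node to target."""
--     if current == target:
--         return path + [target]
--
--     if current in visited:
--         return []
--
--     visited.add(current)
--
--     children = depends_on.get(current, [])
--     longest_path = []
--
--     for child, _ in children:
--         if child not in path:  # Avoid cycles
--             new_path = find_longest_path_to_target(tree, depends_on, target, child, path + [current], visited.copy())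
--             if len(new_path) > len(longest_path):
--                 longest_path = new_path
--
--     return longest_path
-- ===== SOURCE B (Python) =====
-- def find_longest_path_to_target(tree, depends_on, target, current, path, visited):
--     """Find the longest path from current node to target (iterative DFS with an explicit stack)."""
--     if current == target:
--         return path + [target]
--     if current in visited:
--         return []
--     visited.add(current)
--     best = []
--     stack = [(current, path)]
--     while stack:
--         node, p = stack.pop()
--         if node == target:
--             cand = p + [target]
--             if len(cand) > len(best):
--                 best = cand
--             continue
--         np = p + [node]
--         for child, _ in reversed(depends_on.get(node, [])):
--             if child not in p and (child == target or (child not in visited and child != node)):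
--                 stack.append((child, np))
--     return best
-- ===== Notes on version B (the rewrite author's own statement) =====
-- stated objective: alternative
-- what changed: The recursive DFS (one Python call per node, visited copied into every child call, best path selected per recursion level) is replaced by a single iterative DFS loop over an explicit stack of (node, path) frames: eligibility of a child is decided once at push time and one global best path is maintained with strict '>' across the whole loop.
import Mathlib
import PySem

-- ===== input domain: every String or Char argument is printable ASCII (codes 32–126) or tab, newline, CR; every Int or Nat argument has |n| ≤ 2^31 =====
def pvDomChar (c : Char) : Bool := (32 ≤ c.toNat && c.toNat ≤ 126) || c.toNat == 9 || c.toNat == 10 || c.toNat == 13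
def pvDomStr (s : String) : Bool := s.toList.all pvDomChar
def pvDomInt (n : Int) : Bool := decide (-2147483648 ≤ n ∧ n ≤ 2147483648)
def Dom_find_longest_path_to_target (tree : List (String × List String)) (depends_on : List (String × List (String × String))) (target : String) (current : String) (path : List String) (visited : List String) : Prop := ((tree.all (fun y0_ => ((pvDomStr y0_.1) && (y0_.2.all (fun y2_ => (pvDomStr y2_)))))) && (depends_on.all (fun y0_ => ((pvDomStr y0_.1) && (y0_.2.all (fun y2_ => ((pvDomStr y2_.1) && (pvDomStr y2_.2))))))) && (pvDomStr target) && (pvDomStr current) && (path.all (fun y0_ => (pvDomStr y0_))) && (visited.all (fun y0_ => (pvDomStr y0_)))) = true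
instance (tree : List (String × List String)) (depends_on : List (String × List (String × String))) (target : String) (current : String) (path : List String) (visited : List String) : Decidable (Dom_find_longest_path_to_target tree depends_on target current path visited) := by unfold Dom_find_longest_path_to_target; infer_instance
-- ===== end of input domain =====

-- ===== PORT A =====
-- B changes only the decomposition (iterative stack DFS instead of recursion); the equivalence proved
-- is about the RETURN value — both Pythons perform the same single mutation visited.add(current).

-- Shared totality fuel: every expanded node is fresh w.r.t. the visited set it receives, and all
-- expanded nodes except the first are children listed in depends_on, so the recursion/stack depth is
-- bounded by the number of dependency edges.  The fuel is a termination device only; it is never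
-- exhausted on any input (it plays no role in either Python program).
def pvFuel (depends_on : List (String × List (String × String))) : Nat :=
  (depends_on.map (fun kv => kv.2.length)).sum + 2

-- literal port of A's recursion (fuel added for totality only)
def goA (dep : List (String × List (String × String))) (target : String) :
    Nat → String → List String → List String → List String
  | 0, _, _, _ => []
  | f+1, current, path, visited =>
    if current = target then path ++ [target]
    else if current ∈ visited then []
    else
      (PySem.Dict.getD ⟨dep⟩ current []).foldl
        (fun longest_path cp =>
          if cp.1 ∉ path then
            let new_path := goA dep target f cp.1 (path ++ [current]) (PySem.Set.add visited current)
            if new_path.length > longest_path.length then new_path else longest_path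
          else longest_path) []

def find_longest_path_to_target (tree : List (String × List String)) (depends_on : List (String × List (String × String))) (target : String) (current : String) (path : List String) (visited : List String) : List String :=
  goA depends_on target (pvFuel depends_on) current path visited

-- ===== PORT B =====
-- the two lemmas below are cited by goB's decreasing_by (frame weights for the stack measure)

-- pushing (in reversed child order) onto a stack = prepending the eligible children in order
theorem pv_foldl_rev_push {α β : Type} (P : α → Prop) [DecidablePred P] (g : α → β) (l : List α) :
    ∀ st : List β, l.reverse.foldl (fun st x => if P x then g x :: st else st) st
      = (l.filter (fun x => decide (P x))).map g ++ st := by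
  induction l with
  | nil => intro st; rfl
  | cons x xs ih =>
    intro st
    by_cases h : P x <;> simp [List.foldl_append, ih, h]

theorem pv_children_len_le (dep : List (String × List (String × String))) (k : String) :
    (PySem.Dict.getD ⟨dep⟩ k []).length ≤ (dep.map (fun kv => kv.2.length)).sum := by
  simp only [PySem.Dict.getD, PySem.Dict.get?]
  cases hf : List.find? (fun p => p.1 == k) dep with
  | none => simp
  | some kv =>
    simp only [Option.map_some, Option.getD_some]
    exact List.le_sum_of_mem (List.mem_map_of_mem (List.mem_of_find?_eq_some hf))

-- stack measure: each frame (node, path, fuel) weighs (pvFuel dep) ^ fuel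
def pvWsum (K : Nat) (st : List (String × List String × Nat)) : Nat :=
  (st.map (fun fr => K ^ fr.2.2)).sum

-- literal port of B's while-loop; frames carry a fuel (termination device only, cf. pvFuel)
def goB (dep : List (String × List (String × String))) (target : String) (visited : List String) :
    List (String × List String × Nat) → List String → List String
  | [], best => best
  | (_, _, 0) :: rest, best => goB dep target visited rest best
  | (node, p, f+1) :: rest, best =>
    if node = target then
      goB dep target visited rest
        (if (p ++ [target]).length > best.length then p ++ [target] else best)
    else
      goB dep target visited
        (((PySem.Dict.getD ⟨dep⟩ node []).reverse).foldl
          (fun st cp =>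
            if cp.1 ∉ p ∧ (cp.1 = target ∨ (cp.1 ∉ visited ∧ cp.1 ≠ node))
            then (cp.1, p ++ [node], f) :: st else st) rest)
        best
  termination_by st _ => pvWsum (pvFuel dep) st
  decreasing_by
  · simp [pvWsum]
  · simp only [pvWsum, List.map_cons, List.sum_cons, Nat.succ_eq_add_one]
    have h1 : 0 < pvFuel dep ^ (f+1) := pow_pos (by unfold pvFuel; omega) _
    omega
  · simp only [dite_eq_ite, Nat.succ_eq_add_one]
    rw [pv_foldl_rev_push]
    simp only [pvWsum, List.map_append, List.sum_append, List.map_map, List.map_cons, List.sum_cons]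
    have hlen : ((PySem.Dict.getD ⟨dep⟩ node []).filter
        (fun cp => decide (cp.1 ∉ p ∧ (cp.1 = target ∨ (cp.1 ∉ visited ∧ cp.1 ≠ node))))).length
        ≤ (dep.map (fun kv => kv.2.length)).sum :=
      le_trans (List.length_filter_le _ _) (pv_children_len_le dep node)
    have hconst : ((((PySem.Dict.getD ⟨dep⟩ node []).filter
        (fun cp => decide (cp.1 ∉ p ∧ (cp.1 = target ∨ (cp.1 ∉ visited ∧ cp.1 ≠ node))))).map
          ((fun fr => pvFuel dep ^ fr.2.2) ∘ (fun cp => (cp.1, p ++ [node], f)))).sum)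
        ≤ (dep.map (fun kv => kv.2.length)).sum * pvFuel dep ^ f := by
      rw [show ((fun fr => pvFuel dep ^ fr.2.2) ∘ (fun cp : String × String => (cp.1, p ++ [node], f)))
            = fun _ => pvFuel dep ^ f from rfl]
      rw [List.map_const', List.sum_replicate, smul_eq_mul]
      exact Nat.mul_le_mul_right _ hlen
    have hpow : (dep.map (fun kv => kv.2.length)).sum * pvFuel dep ^ f < pvFuel dep ^ (f+1) := by
      rw [pow_succ, Nat.mul_comm (pvFuel dep ^ f)]
      exact Nat.mul_lt_mul_of_lt_of_le (by unfold pvFuel; omega) le_rfl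
        (pow_pos (by unfold pvFuel; omega) _)
    omega

def find_longest_path_to_target_alt (tree : List (String × List String)) (depends_on : List (String × List (String × String))) (target : String) (current : String) (path : List String) (visited : List String) : List String :=
  if current = target then path ++ [target]
  else if current ∈ visited then []
  else goB depends_on target (PySem.Set.add visited current)
        [(current, path, pvFuel depends_on)] []

-- ===== PRECONDITION & SPEC =====
def Spec_find_longest_path_to_target (tree : List (String × List String)) (depends_on : List (String × List (String × String))) (target : String) (current : String) (path : List String) (visited : List String) (out : List String) : Prop := out = find_longest_path_to_target_alt tree depends_on target current path visited
instance (tree : List (String × List String)) (depends_on : List (String × List (String × String))) (target : String) (current : String) (path : List String) (visited : List String) (out : List String) : Decidable (Spec_find_longest_path_to_target tree depends_on target current path visited out) := by unfold Spec_find_longest_path_to_target; infer_instance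

-- ===== CLAIM (what is proved, stated in full; the proofs are below) =====
def Claim_equal_find_longest_path_to_target : Prop := ∀ (tree : List (String × List String)) (depends_on : List (String × List (String × String))) (target : String) (current : String) (path : List String) (visited : List String), Dom_find_longest_path_to_target tree depends_on target current path visited → Spec_find_longest_path_to_target tree depends_on target current path visited (find_longest_path_to_target tree depends_on target current path visited)

-- ===== LEMMAS AND PROOFS =====

-- `if new.length > longest.length then new else longest`, as a function
def pvPick (b x : List String) : List String := if x.length > b.length then x else b

-- the common functional core of both programs: DFS from `node` keeping the first strictly
-- longest complete path, with eligibility decided against the fixed set `vis`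
def goA2 (dep : List (String × List (String × String))) (target : String) (vis : List String) :
    Nat → String → List String → List String
  | 0, _, _ => []
  | f+1, node, p =>
    if node = target then p ++ [target]
    else (PySem.Dict.getD ⟨dep⟩ node []).foldl
      (fun longest cp =>
        if cp.1 ∉ p ∧ (cp.1 = target ∨ (cp.1 ∉ vis ∧ cp.1 ≠ node))
        then pvPick longest (goA2 dep target vis f cp.1 (p ++ [node]))
        else longest) []

theorem pvPick_nil_left (x : List String) : pvPick [] x = x := by
  cases x <;> simp [pvPick]

theorem pvPick_nil_right (b : List String) : pvPick b [] = b := by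
  simp [pvPick]

theorem pvPick_assoc (b y M : List String) :
    pvPick (pvPick b y) M = pvPick b (pvPick y M) := by
  unfold pvPick
  split_ifs <;> first | rfl | (exfalso; omega)

theorem pv_goA_dead (dep : List (String × List (String × String))) (target : String)
    (f : Nat) (n : String) (p v : List String) (h1 : n ≠ target) (h2 : n ∈ v) :
    goA dep target f n p v = [] := by
  cases f <;> simp [goA, h1, h2]

theorem pv_goA_eq_goA2 (dep : List (String × List (String × String))) (target : String)
    (vis : List String) :
    ∀ (f : Nat) (node : String) (p S visA : List String),
    (∀ x, (x ∈ visA ∨ x = node) ↔ (x ∈ vis ∨ x ∈ S ∨ x = node)) →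
    (∀ x ∈ S, x ∈ p) →
    (node = target ∨ node ∉ visA) →
    goA dep target f node p visA = goA2 dep target vis f node p := by
  intro f
  induction f with
  | zero => intro node p S visA _ _ _; rfl
  | succ f ih =>
    intro node p S visA Hmem HS Hnode
    by_cases ht : node = target
    · simp [goA, goA2, ht]
    · have hnv : node ∉ visA := Hnode.resolve_left ht
      simp only [goA, goA2, if_neg ht, if_neg hnv]
      have hfun : (fun (longest_path : List String) (cp : String × String) =>
          if cp.1 ∉ p then
            let new_path := goA dep target f cp.1 (p ++ [node]) (PySem.Set.add visA node)
            if new_path.length > longest_path.length then new_path else longest_path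
          else longest_path)
        = (fun (longest : List String) (cp : String × String) =>
          if cp.1 ∉ p ∧ (cp.1 = target ∨ (cp.1 ∉ vis ∧ cp.1 ≠ node))
          then pvPick longest (goA2 dep target vis f cp.1 (p ++ [node]))
          else longest) := by
        funext acc cp
        by_cases hp : cp.1 ∈ p
        · simp [hp]
        · by_cases hc : cp.1 = target ∨ (cp.1 ∉ vis ∧ cp.1 ≠ node)
          · have hrec : goA dep target f cp.1 (p ++ [node]) (PySem.Set.add visA node)
                = goA2 dep target vis f cp.1 (p ++ [node]) := by
              apply ih cp.1 (p ++ [node]) (node :: S) (PySem.Set.add visA node)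
              · intro x
                rw [PySem.Set.mem_add]
                constructor
                · rintro ((hx | rfl) | rfl)
                  · rcases (Hmem x).mp (Or.inl hx) with h | h | h
                    · exact Or.inl h
                    · exact Or.inr (Or.inl (List.mem_cons_of_mem _ h))
                    · exact Or.inr (Or.inl (List.mem_cons.mpr (Or.inl h)))
                  · exact Or.inr (Or.inl (List.mem_cons.mpr (Or.inl rfl)))
                  · exact Or.inr (Or.inr rfl)
                · rintro (hx | hx | rfl)
                  · rcases (Hmem x).mpr (Or.inl hx) with h | h
                    · exact Or.inl (Or.inl h)
                    · exact Or.inl (Or.inr h)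
                  · rcases List.mem_cons.mp hx with rfl | hx
                    · exact Or.inl (Or.inr rfl)
                    · rcases (Hmem x).mpr (Or.inr (Or.inl hx)) with h | h
                      · exact Or.inl (Or.inl h)
                      · exact Or.inl (Or.inr h)
                  · exact Or.inr rfl
              · intro x hx
                rcases List.mem_cons.mp hx with rfl | hx
                · exact List.mem_append.mpr (Or.inr (List.mem_cons.mpr (Or.inl rfl)))
                · exact List.mem_append.mpr (Or.inl (HS x hx))
              · rcases hc with h | ⟨hv2, hn2⟩
                · exact Or.inl h
                · refine Or.inr (fun hmem => ?_)
                  rw [PySem.Set.mem_add] at hmem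
                  rcases hmem with hx | rfl
                  · rcases (Hmem cp.1).mp (Or.inl hx) with h | h | h
                    · exact hv2 h
                    · exact hp (HS _ h)
                    · exact hn2 h
                  · exact hn2 rfl
            simp [hp, hc, hrec, pvPick]
          · have hdead : goA dep target f cp.1 (p ++ [node]) (PySem.Set.add visA node) = [] := by
              have hct : cp.1 ≠ target := fun h => hc (Or.inl h)
              apply pv_goA_dead dep target f cp.1 _ _ hct
              rw [PySem.Set.mem_add]
              by_cases hv2 : cp.1 ∈ vis
              · rcases (Hmem cp.1).mpr (Or.inl hv2) with h | h
                · exact Or.inl h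
                · exact Or.inr h
              · by_cases hn : cp.1 = node
                · exact Or.inr hn
                · exact absurd (Or.inr ⟨hv2, hn⟩) hc
            simp [hp, hc, hdead]
      rw [hfun]

theorem pv_foldl_pick {α : Type} (g : List String → α → List String)
    (hg : ∀ b x, g b x = pvPick b (g [] x)) :
    ∀ (l : List α) (b : List String), l.foldl g b = pvPick b (l.foldl g []) := by
  intro l
  induction l with
  | nil => intro b; simp [pvPick_nil_right]
  | cons x xs ihl =>
    intro b
    calc List.foldl g b (x :: xs) = List.foldl g (g b x) xs := rfl
      _ = pvPick (g b x) (List.foldl g [] xs) := ihl _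
      _ = pvPick (pvPick b (g [] x)) (List.foldl g [] xs) := by rw [hg]
      _ = pvPick b (pvPick (g [] x) (List.foldl g [] xs)) := pvPick_assoc _ _ _
      _ = pvPick b (List.foldl g (g [] x) xs) := by rw [ihl (g [] x)]
      _ = pvPick b (List.foldl g [] (x :: xs)) := rfl

theorem pv_goB_frame (dep : List (String × List (String × String))) (target : String)
    (vis : List String) :
    ∀ (f : Nat) (node : String) (p : List String)
      (rest : List (String × List String × Nat)) (best : List String),
    goB dep target vis ((node, p, f) :: rest) best
      = goB dep target vis rest (pvPick best (goA2 dep target vis f node p)) := by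
  intro f
  induction f with
  | zero =>
    intro node p rest best
    rw [goB, goA2, pvPick_nil_right]
  | succ f ih =>
    intro node p rest best
    by_cases ht : node = target
    · rw [goB]
      simp only [if_pos ht]
      rw [goA2]
      simp [ht, pvPick]
    · rw [goB]
      simp only [if_neg ht]
      rw [pv_foldl_rev_push]
      have inner : ∀ (cs : List (String × String)) (rest' : List (String × List String × Nat))
          (best : List String),
          goB dep target vis
            ((cs.filter (fun cp => decide (cp.1 ∉ p ∧ (cp.1 = target ∨ (cp.1 ∉ vis ∧ cp.1 ≠ node))))).map
              (fun cp => (cp.1, p ++ [node], f)) ++ rest') best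
          = goB dep target vis rest'
              (cs.foldl (fun longest cp =>
                if cp.1 ∉ p ∧ (cp.1 = target ∨ (cp.1 ∉ vis ∧ cp.1 ≠ node))
                then pvPick longest (goA2 dep target vis f cp.1 (p ++ [node]))
                else longest) best) := by
        intro cs
        induction cs with
        | nil => intro rest' best; rfl
        | cons cp cs ihc =>
          intro rest' best
          by_cases hok : cp.1 ∉ p ∧ (cp.1 = target ∨ (cp.1 ∉ vis ∧ cp.1 ≠ node))
          · rw [List.filter_cons_of_pos (by simpa using hok), List.map_cons, List.cons_append,
              ih, ihc]
            simp [hok]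
          · rw [List.filter_cons_of_neg (by simpa using hok), ihc]
            simp [hok]
      rw [inner]
      have hg : ∀ (b : List String) (cp : String × String),
          (fun longest cp =>
            if cp.1 ∉ p ∧ (cp.1 = target ∨ (cp.1 ∉ vis ∧ cp.1 ≠ node))
            then pvPick longest (goA2 dep target vis f cp.1 (p ++ [node]))
            else longest) b cp
          = pvPick b ((fun longest cp =>
            if cp.1 ∉ p ∧ (cp.1 = target ∨ (cp.1 ∉ vis ∧ cp.1 ≠ node))
            then pvPick longest (goA2 dep target vis f cp.1 (p ++ [node]))
            else longest) [] cp) := by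
        intro b cp
        by_cases hok : cp.1 ∉ p ∧ (cp.1 = target ∨ (cp.1 ∉ vis ∧ cp.1 ≠ node))
        · simp only [if_pos hok, pvPick_nil_left]
        · simp only [if_neg hok, pvPick_nil_right]
      rw [pv_foldl_pick _ hg]
      congr 1
      rw [goA2, if_neg ht]

-- ===== VERDICT (by name: the statement is the Claim_ definition above) =====
theorem find_longest_path_to_target_spec : Claim_equal_find_longest_path_to_target := by
  unfold Claim_equal_find_longest_path_to_target Spec_find_longest_path_to_target
  intro tree dep target current path visited _
  unfold find_longest_path_to_target find_longest_path_to_target_alt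
  by_cases ht : current = target
  · obtain ⟨f, hf⟩ : ∃ f, pvFuel dep = f + 1 :=
      ⟨(dep.map (fun kv => kv.2.length)).sum + 1, rfl⟩
    rw [hf, goA]
    simp [ht]
  · by_cases hv : current ∈ visited
    · obtain ⟨f, hf⟩ : ∃ f, pvFuel dep = f + 1 :=
        ⟨(dep.map (fun kv => kv.2.length)).sum + 1, rfl⟩
      rw [hf, goA]
      simp [ht, hv]
    · rw [if_neg ht, if_neg hv, pv_goB_frame, goB, pvPick_nil_left]
      exact pv_goA_eq_goA2 dep target (PySem.Set.add visited current) (pvFuel dep) current path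
        [] visited
        (by intro x; rw [PySem.Set.mem_add]; tauto)
        (by intro x hx; cases hx)
        (Or.inr hv)
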